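-- pv_equiv track=rewrite | github.com/daniel3303/UnoAI | uno_ai/environment/uno_env.py | _number_to_tokens
-- ===== SOURCE A (Python) =====
-- from typing import Dict, List, Optional, Tuple, Any
--
-- def _number_to_tokens(number: int) -> List[int]:
--     """Convert number to digit tokens"""
--     if number == 0:
--         return [110]
--
--     digits = []
--     while number > 0:
--         digits.append(110 + (number % 10))
--         number //= 10
--
--     return digits[::-1]
-- ===== SOURCE B (Python) =====
-- def _number_to_tokens(number: int) -> list:
--     """Convert number to digit tokens: one pass over the decimal string."""
--     return [110 + int(c) for c in str(number)]
-- ===== Notes on version B (the rewrite author's own statement) =====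
-- stated objective: idiomatic
-- what changed: B maps the characters of str(number) to 110+digit in one most-significant-first comprehension, replacing A's mod/div extraction loop, its special 0 case and the trailing reversal.
-- outside the precondition, e.g. on _number_to_tokens(-5): A returns [], B raises ValueError
import Mathlib
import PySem

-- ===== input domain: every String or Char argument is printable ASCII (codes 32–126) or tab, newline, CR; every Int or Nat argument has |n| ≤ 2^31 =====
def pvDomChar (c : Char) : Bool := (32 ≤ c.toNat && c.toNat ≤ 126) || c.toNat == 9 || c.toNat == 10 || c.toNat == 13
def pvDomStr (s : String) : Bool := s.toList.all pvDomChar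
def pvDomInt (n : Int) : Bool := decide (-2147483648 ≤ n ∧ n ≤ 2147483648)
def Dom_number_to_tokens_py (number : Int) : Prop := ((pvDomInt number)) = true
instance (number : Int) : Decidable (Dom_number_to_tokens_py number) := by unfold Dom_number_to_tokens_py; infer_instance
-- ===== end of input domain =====

-- B replaces A's mod/div digit-extraction loop + reversal by one most-significant-first map over str(number); same cost, more idiomatic.
-- Pre_ excludes negative numbers, on which A's while loop never runs and it returns an accidental []; B (int(c) on '-') raises ValueError there.


-- ===== PORT A =====
-- the 'while number > 0' loop: appends 110 + number % 10, then number //= 10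
def aLoop (number : Int) (digits : List Int) : List Int :=
  if 0 < number then
    aLoop (PySem.Int.floordiv number 10) (digits ++ [110 + PySem.Int.mod number 10])
  else digits
termination_by number.toNat
decreasing_by
  have h10 : PySem.Int.floordiv number 10 = number / 10 :=
    PySem.Int.floordiv_eq_ediv_of_pos (by omega)
  rw [h10]; omega

def number_to_tokens_py (number : Int) : List Int :=
  if number = 0 then [110]
  else (aLoop number []).reverse   -- digits[::-1]

-- ===== PORT B =====
-- int(c) for a single char; exact where c is a decimal digit (guaranteed under Pre_)
def digitTok (c : Char) : Int := 110 + (PySem.Int.ofChars? [c]).getD 0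

def number_to_tokens_py_alt (number : Int) : List Int :=
  (PySem.Int.toChars number).map digitTok

-- ===== PRECONDITION & SPEC =====
-- Pre_ excludes negative numbers: there A returns an accidental [] (its loop never runs) while B's int('-') raises ValueError.
def Pre_number_to_tokens_py (number : Int) : Prop := 0 ≤ number
instance (number : Int) : Decidable (Pre_number_to_tokens_py number) := by unfold Pre_number_to_tokens_py; infer_instance
def pvWitness_number_to_tokens_py : Int := 123

def Spec_number_to_tokens_py (number : Int) (out : List Int) : Prop := out = number_to_tokens_py_alt number
instance (number : Int) (out : List Int) : Decidable (Spec_number_to_tokens_py number out) := by unfold Spec_number_to_tokens_py; infer_instance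

-- ===== CLAIM (what is proved, stated in full; the proofs are below) =====
def Claim_equal_number_to_tokens_py : Prop := ∀ (number : Int), Dom_number_to_tokens_py number → Pre_number_to_tokens_py number → Spec_number_to_tokens_py number (number_to_tokens_py number)

-- ===== LEMMAS AND PROOFS =====

-- reference: tokens of a Nat, least-significant first
def revToks (n : Nat) : List Int :=
  if h : n = 0 then [] else (110 + ((n % 10 : Nat) : Int)) :: revToks (n / 10)
termination_by n
decreasing_by omega

-- reference: decimal digit chars of a Nat, most-significant first
def msChars (n : Nat) : List Char :=
  if h : n / 10 = 0 then [Nat.digitChar (n % 10)]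
  else msChars (n / 10) ++ [Nat.digitChar (n % 10)]
termination_by n
decreasing_by omega

theorem aLoop_natCast (m : Nat) : ∀ ds, aLoop (m : Int) ds = ds ++ revToks m := by
  induction m using Nat.strong_induction_on with
  | _ m ih =>
    intro ds
    rw [aLoop]
    by_cases hm : m = 0
    · subst hm; simp [revToks]
    · have hpos : (0 : Int) < (m : Int) := by exact_mod_cast Nat.pos_of_ne_zero hm
      rw [if_pos hpos]
      have hfd : PySem.Int.floordiv (m : Int) 10 = ((m / 10 : Nat) : Int) := by
        exact_mod_cast PySem.Int.floordiv_natCast m 10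
      have hmd : PySem.Int.mod (m : Int) 10 = ((m % 10 : Nat) : Int) := by
        exact_mod_cast PySem.Int.mod_natCast m 10
      rw [hfd, hmd, ih (m / 10) (by omega)]
      conv_rhs => rw [revToks]
      rw [dif_neg hm]
      simp

theorem toDigitsCore_eq (n : Nat) : ∀ fuel ds, n < fuel →
    Nat.toDigitsCore 10 fuel n ds = msChars n ++ ds := by
  induction n using Nat.strong_induction_on with
  | _ n ih =>
    intro fuel ds hfuel
    match fuel with
    | 0 => omega
    | fuel + 1 =>
      rw [Nat.toDigitsCore]
      by_cases h0 : n / 10 = 0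
      · simp only [h0, if_pos]
        rw [msChars, dif_pos h0]
        simp
      · rw [if_neg h0]
        have hlt : n / 10 < n := Nat.div_lt_self (by omega) (by omega)
        rw [ih (n / 10) hlt fuel _ (by omega)]
        conv_rhs => rw [msChars]
        rw [dif_neg h0]
        simp

theorem digitTok_digitChar (d : Nat) (h : d < 10) :
    digitTok (Nat.digitChar d) = 110 + (d : Int) := by
  interval_cases d <;> rfl

theorem msChars_map (n : Nat) (hn0 : 0 < n) : (msChars n).map digitTok = (revToks n).reverse := by
  induction n using Nat.strong_induction_on with
  | _ n ih =>
    have hn : n ≠ 0 := by omega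
    by_cases h0 : n / 10 = 0
    · rw [msChars, dif_pos h0, revToks, dif_neg hn, revToks, dif_pos h0]
      simp [digitTok_digitChar (n % 10) (Nat.mod_lt _ (by omega))]
    · rw [msChars, dif_neg h0, revToks, dif_neg hn]
      have hlt : n / 10 < n := Nat.div_lt_self (by omega) (by omega)
      simp [ih (n / 10) hlt (by omega), digitTok_digitChar (n % 10) (Nat.mod_lt _ (by omega))]

-- ===== VERDICT (by name: the statement is the Claim_ definition above) =====
theorem number_to_tokens_py_spec : Claim_equal_number_to_tokens_py := by
  intro number _hdom hpre
  unfold Pre_number_to_tokens_py at hpre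
  unfold Spec_number_to_tokens_py number_to_tokens_py number_to_tokens_py_alt
  have hcast : ((number.toNat : Int)) = number := Int.toNat_of_nonneg hpre
  by_cases h0 : number = 0
  · subst h0; decide
  · rw [if_neg h0]
    rw [PySem.Int.toChars]
    rw [if_neg (by omega)]
    have htd : Nat.toDigits 10 number.toNat = msChars number.toNat := by
      rw [Nat.toDigits]
      rw [toDigitsCore_eq number.toNat (number.toNat + 1) [] (by omega)]
      simp
    rw [htd, msChars_map number.toNat (by omega), ← hcast, aLoop_natCast]
    simp
    congr 1
    omega
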